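-- pv_equiv track=rewrite | github.com/matkoniecz/mediawiki_file_copyright_handler_bot | shared.py | generate_matrix_array
-- ===== SOURCE A (Python) =====
-- def generate_matrix_array(displayed_parts, break_after):
--     columns = 3
--     split_into_rows = []
--     new_row = []
--     index = 0
--
--     while index < len(displayed_parts):
--         if (index % columns) == 0:
--             if len(new_row) > 0:
--                 split_into_rows.append(new_row)
--             new_row = []
--         new_row.append(displayed_parts[index])
--         index += 1
--     if new_row != []:
--         split_into_rows.append(new_row)
--     return generate_array_wikicode(split_into_rows)
--
-- def generate_array_wikicode(split_into_rows):
--     # split_into_rows - list of lists (list of row, each represented by a list)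
--
--     output = '{| class="wikitable"\n'
--     for row in split_into_rows:
--         output += "|-\n"
--         output += "| " + " || ".join(row) + "\n"
--     output += "|}\n"
--     return output
-- ===== SOURCE B (Python) =====
-- def generate_matrix_array(displayed_parts, break_after):
--     lines = ['{| class="wikitable"']
--     for i in range(0, len(displayed_parts), 3):
--         lines.append("|-")
--         lines.append("| " + " || ".join(displayed_parts[i:i + 3]))
--     lines.append("|}")
--     return "\n".join(lines) + "\n"
-- ===== Notes on version B (the rewrite author's own statement) =====
-- stated objective: simpler
-- what changed: Replaces the element-by-element modulo loop with running new_row mutation plus the separate grouping list and string-accumulating wikicode helper by a single pass that slices the input in strides of 3 and joins the collected lines once with newline.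
import Mathlib
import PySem

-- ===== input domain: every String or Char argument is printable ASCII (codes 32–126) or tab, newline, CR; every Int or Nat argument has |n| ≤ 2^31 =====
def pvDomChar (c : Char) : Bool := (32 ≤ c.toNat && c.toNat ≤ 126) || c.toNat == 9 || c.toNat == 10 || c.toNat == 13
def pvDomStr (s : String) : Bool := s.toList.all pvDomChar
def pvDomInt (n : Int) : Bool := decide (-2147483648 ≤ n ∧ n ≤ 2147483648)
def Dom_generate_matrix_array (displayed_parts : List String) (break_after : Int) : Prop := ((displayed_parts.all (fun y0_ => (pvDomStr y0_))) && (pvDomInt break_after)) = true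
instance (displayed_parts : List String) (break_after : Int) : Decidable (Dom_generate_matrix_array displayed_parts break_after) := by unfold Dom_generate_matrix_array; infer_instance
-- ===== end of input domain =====

-- B builds the wikitable in one pass over stride-3 slices and a single newline-join,
-- replacing A's per-element modulo loop, mutated new_row and separate wikicode helper (same O(n) cost).


-- ===== PORT A =====
-- A's while loop: index over the list, starting a fresh row whenever index % 3 == 0.
def pvALoop (dp : List String) (rows : List (List String)) (new_row : List String) (index : Nat) :
    List (List String) × List String :=
  if h : index < dp.length then
    let p : List (List String) × List String :=
      if index % 3 = 0 then
        (if new_row.length > 0 then rows ++ [new_row] else rows, [])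
      else (rows, new_row)
    pvALoop dp p.1 (p.2 ++ [dp[index]]) (index + 1)
  else (rows, new_row)
termination_by dp.length - index

-- A's helper generate_array_wikicode: string accumulation over the rows.
def pvWikicode (split_into_rows : List (List String)) : String :=
  (split_into_rows.foldl
    (fun output row => output ++ "|-\n" ++ ("| " ++ PySem.Str.join " || " row ++ "\n"))
    "{| class=\"wikitable\"\n") ++ "|}\n"

def generate_matrix_array (displayed_parts : List String) (break_after : Int) : String :=
  let r := pvALoop displayed_parts [] [] 0
  let split_into_rows := if r.2 ≠ [] then r.1 ++ [r.2] else r.1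
  pvWikicode split_into_rows

-- ===== PORT B =====
-- B's loop 'for i in range(0, len, 3)': each step emits "|-" and the joined 3-slice.
def pvBLines : List String → List String
  | [] => []
  | x :: xs => "|-" :: ("| " ++ PySem.Str.join " || " ((x :: xs).take 3)) :: pvBLines (xs.drop 2)
termination_by l => l.length
decreasing_by simp

def generate_matrix_array_alt (displayed_parts : List String) (break_after : Int) : String :=
  PySem.Str.join "\n" ("{| class=\"wikitable\"" :: (pvBLines displayed_parts ++ ["|}"])) ++ "\n"

-- ===== PRECONDITION & SPEC =====
def Spec_generate_matrix_array (displayed_parts : List String) (break_after : Int) (out : String) : Prop := out = generate_matrix_array_alt displayed_parts break_after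
instance (displayed_parts : List String) (break_after : Int) (out : String) : Decidable (Spec_generate_matrix_array displayed_parts break_after out) := by unfold Spec_generate_matrix_array; infer_instance

-- ===== CLAIM (what is proved, stated in full; the proofs are below) =====
def Claim_equal_generate_matrix_array : Prop := ∀ (displayed_parts : List String) (break_after : Int), Dom_generate_matrix_array displayed_parts break_after → Spec_generate_matrix_array displayed_parts break_after (generate_matrix_array displayed_parts break_after)

-- ===== LEMMAS AND PROOFS =====

-- the stride-3 chunking both programs realise (proof helper)
def pvChunks : List String → List (List String)
  | [] => []
  | [a] => [[a]]
  | [a, b] => [[a, b]]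
  | a :: b :: c :: rest => [a, b, c] :: pvChunks rest

def pvFinalize (r : List (List String) × List String) : List (List String) :=
  if r.2 ≠ [] then r.1 ++ [r.2] else r.1

lemma pvBLines_nil : pvBLines [] = [] := by rw [pvBLines.eq_def]

lemma pvBLines_cons (x : String) (xs : List String) :
    pvBLines (x :: xs) =
      "|-" :: ("| " ++ PySem.Str.join " || " ((x :: xs).take 3)) :: pvBLines (xs.drop 2) := by
  simp [pvBLines]

lemma pvJoin_cons_cons (sep x y : String) (l : List String) :
    PySem.Str.join sep (x :: y :: l) = x ++ (sep ++ PySem.Str.join sep (y :: l)) := by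
  simp only [PySem.Str.join, List.map_cons, PySem.Chars.join_cons_cons, List.append_assoc,
    String.ofList_append, String.ofList_toList]

lemma pvJoin_cons (sep x : String) (l : List String) (h : l ≠ []) :
    PySem.Str.join sep (x :: l) = x ++ (sep ++ PySem.Str.join sep l) := by
  cases l with
  | nil => exact absurd rfl h
  | cons y t => exact pvJoin_cons_cons sep x y t

-- flushing a pending nonempty row at a row boundary first does not change the final row list
lemma pvALoop_flush (dp : List String) (rows : List (List String)) (nr : List String)
    (index : Nat) (h3 : index % 3 = 0) (hnr : nr ≠ []) :
    pvFinalize (pvALoop dp rows nr index) = pvFinalize (pvALoop dp (rows ++ [nr]) [] index) := by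
  by_cases h0 : index < dp.length
  · rw [pvALoop, pvALoop]
    have hlen : nr.length > 0 := by cases nr with | nil => exact absurd rfl hnr | cons a t => simp
    simp [h0, h3, hlen]
  · rw [pvALoop, pvALoop]
    simp [h0, pvFinalize, hnr]

-- A's loop, entered at a row boundary with an empty row, appends exactly the stride-3 chunks
lemma pvALoop_chunks : ∀ (n : Nat) (dp : List String) (index : Nat) (rows : List (List String)),
    dp.length - index = n → index % 3 = 0 →
    pvFinalize (pvALoop dp rows [] index) = rows ++ pvChunks (dp.drop index) := by
  intro n
  induction n using Nat.strong_induction_on with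
  | _ n ih =>
    intro dp index rows hn h3
    by_cases h0 : index < dp.length
    · have e0 : dp.drop index = dp[index] :: dp.drop (index + 1) := List.drop_eq_getElem_cons h0
      rw [pvALoop]
      simp only [h0, dif_pos, h3, if_pos, List.length_nil, gt_iff_lt, Nat.lt_irrefl,
        if_false, List.nil_append]
      by_cases h1 : index + 1 < dp.length
      · have e1 : dp.drop (index + 1) = dp[index + 1] :: dp.drop (index + 2) :=
          List.drop_eq_getElem_cons h1
        have h3' : ¬ (index + 1) % 3 = 0 := by omega
        rw [pvALoop]
        simp only [h1, dif_pos, if_neg h3', List.cons_append, List.nil_append]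
        by_cases h2 : index + 2 < dp.length
        · have e2 : dp.drop (index + 2) = dp[index + 2] :: dp.drop (index + 3) :=
            List.drop_eq_getElem_cons h2
          have h3'' : ¬ (index + 1 + 1) % 3 = 0 := by omega
          rw [pvALoop]
          simp only [show index + 1 + 1 = index + 2 from rfl, h2, dif_pos, if_neg h3'',
            List.cons_append, List.nil_append]
          rw [pvALoop_flush dp rows [dp[index], dp[index + 1], dp[index + 2]] (index + 2 + 1)
            (by omega) (by simp)]
          rw [ih (dp.length - (index + 3)) (by omega) dp (index + 3) _ (by omega) (by omega)]
          rw [e0, e1, e2]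
          simp [pvChunks]
        · have e2 : dp.drop (index + 2) = [] := List.drop_eq_nil_of_le (by omega)
          rw [pvALoop]
          simp only [show index + 1 + 1 = index + 2 from rfl, h2, dif_neg, not_false_iff]
          rw [e0, e1, e2]
          simp [pvFinalize, pvChunks]
      · have e1 : dp.drop (index + 1) = [] := List.drop_eq_nil_of_le (by omega)
        rw [pvALoop]
        simp only [h1, dif_neg, not_false_iff]
        rw [e0, e1]
        simp [pvFinalize, pvChunks]
    · rw [pvALoop]
      rw [List.drop_eq_nil_of_le (Nat.le_of_not_lt h0)]
      simp [h0, pvFinalize, pvChunks]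

-- the two renderings of the chunk list agree, for any accumulated prefix
lemma pvWiki_join : ∀ (n : Nat) (dp : List String), dp.length = n → ∀ (acc : String),
    (pvChunks dp).foldl
      (fun output row => output ++ "|-\n" ++ ("| " ++ PySem.Str.join " || " row ++ "\n")) acc
      ++ "|}\n"
    = acc ++ (PySem.Str.join "\n" (pvBLines dp ++ ["|}"]) ++ "\n") := by
  intro n
  induction n using Nat.strong_induction_on with
  | _ n ih =>
    intro dp hn acc
    cases dp with
    | nil =>
      rw [pvChunks, pvBLines_nil]
      have h : PySem.Str.join "\n" ["|}"] ++ "\n" = "|}\n" := by decide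
      simp only [List.foldl_nil, List.nil_append, h]
    | cons x xs =>
      have hc : pvChunks (x :: xs) = ((x :: xs).take 3) :: pvChunks (xs.drop 2) := by
        match xs with
        | [] => rfl
        | [b] => rfl
        | b :: c :: rest => rfl
      rw [hc, pvBLines_cons]
      simp only [List.foldl_cons, List.cons_append]
      rw [ih (xs.drop 2).length (by rw [← hn]; simp) (xs.drop 2) rfl]
      rw [pvJoin_cons_cons, pvJoin_cons "\n" _ (pvBLines (xs.drop 2) ++ ["|}"]) (by simp)]
      have h : ("|-\n" : String) = "|-" ++ "\n" := by decide
      rw [h]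
      simp only [String.append_assoc]

-- ===== VERDICT (by name: the statement is the Claim_ definition above) =====
theorem generate_matrix_array_spec : Claim_equal_generate_matrix_array := by
  intro dp b _
  show generate_matrix_array dp b = generate_matrix_array_alt dp b
  have h1 : pvFinalize (pvALoop dp [] [] 0) = pvChunks dp := by
    have := pvALoop_chunks dp.length dp 0 [] (by simp) (by simp)
    simpa using this
  have h2 : generate_matrix_array dp b = pvWikicode (pvChunks dp) := by
    unfold generate_matrix_array
    rw [← h1]; rfl
  rw [h2]
  unfold pvWikicode generate_matrix_array_alt
  rw [pvWiki_join dp.length dp rfl]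
  rw [pvJoin_cons "\n" _ (pvBLines dp ++ ["|}"]) (by simp)]
  have h : ("{| class=\"wikitable\"\n" : String) = "{| class=\"wikitable\"" ++ "\n" := by decide
  rw [h]
  simp only [String.append_assoc]
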